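-- pv_equiv track=rewrite | github.com/gorsestarrr/advent-of-code-2023 | 2024/day_05/main.py | check_update
-- ===== SOURCE A (Python) =====
-- def check_update(rules, update):
--     left_set = set()
--     for u in update:
--         if u in left_set:
--             return False
--         if u in rules:
--             left_set.update(r for r in rules[u])
--     return True
-- ===== SOURCE B (Python) =====
-- def check_update(rules, update):
--     # Rule-driven check over first/last occurrence positions: build, in one
--     # pass, the first and last index of every page, then a rule (key -> succs)
--     # is violated iff key occurs and some succ occurs after key's first
--     # occurrence, i.e. first[key] < last[succ].
--     first = {}
--     last = {}
--     for i, u in enumerate(update):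
--         if u not in first:
--             first[u] = i
--         last[u] = i
--     for key, succs in rules.items():
--         if key in first:
--             for v in succs:
--                 if v in last and first[key] < last[v]:
--                     return False
--     return True
-- ===== Notes on version B (the rewrite author's own statement) =====
-- stated objective: alternative
-- what changed: B is rule-driven instead of update-driven: it builds first/last occurrence index maps of the update in one pass and then checks each rule (key -> succs) for first[key] < last[succ], instead of A's single pass over the update that accumulates a growing forbidden set.
import Mathlib
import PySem

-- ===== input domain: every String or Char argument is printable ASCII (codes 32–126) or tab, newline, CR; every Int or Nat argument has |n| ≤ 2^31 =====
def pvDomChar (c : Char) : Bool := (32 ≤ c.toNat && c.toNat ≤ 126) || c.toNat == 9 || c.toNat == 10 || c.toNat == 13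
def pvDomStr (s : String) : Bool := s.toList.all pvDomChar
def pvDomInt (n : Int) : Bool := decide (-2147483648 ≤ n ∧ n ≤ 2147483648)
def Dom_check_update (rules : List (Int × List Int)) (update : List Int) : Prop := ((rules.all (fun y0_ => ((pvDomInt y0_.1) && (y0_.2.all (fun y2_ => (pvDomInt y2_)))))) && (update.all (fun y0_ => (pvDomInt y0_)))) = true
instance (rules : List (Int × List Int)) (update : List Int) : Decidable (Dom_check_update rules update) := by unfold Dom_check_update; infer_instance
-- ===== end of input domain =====

-- B is rule-driven instead of update-driven: it builds first/last occurrence maps of the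
-- update in one pass, then checks each rule via first[key] < last[succ]; same result as A.

-- ===== PORT A =====
-- the 'for u in update' loop of A, with left_set as explicit state
def checkA_loop (rules : PySem.Dict Int (List Int)) : List Int → PySem.Set Int → Bool
  | [], _ => true
  | u :: rest, leftSet =>
    if PySem.Set.contains leftSet u then false
    else
      checkA_loop rules rest
        (if PySem.Dict.contains rules u then PySem.Set.update leftSet (PySem.Dict.getD rules u []) else leftSet)

def check_update (rules : List (Int × List Int)) (update : List Int) : Bool :=
  checkA_loop (PySem.Dict.ofList rules) update PySem.Set.empty

-- ===== PORT B =====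
-- B's first pass: 'for i, u in enumerate(update)' building the first/last occurrence dicts
def checkB_flLoop : List Int → Int → PySem.Dict Int Int → PySem.Dict Int Int →
    PySem.Dict Int Int × PySem.Dict Int Int
  | [], _, first, last => (first, last)
  | u :: rest, i, first, last =>
    checkB_flLoop rest (i + 1)
      (if first.contains u then first else first.insert u i)
      (last.insert u i)

-- B's second pass: 'for key, succs in rules.items()'; the first[key]/last[v] lookups are
-- guarded by contains exactly as in the Python, so getD's default is unreachable
def checkB_rules : PySem.Dict Int Int → PySem.Dict Int Int → List (Int × List Int) → Bool
  | _, _, [] => true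
  | first, last, (key, succs) :: rest =>
    if first.contains key then
      if succs.any (fun v => last.contains v && decide (first.getD key 0 < last.getD v 0)) then
        false
      else checkB_rules first last rest
    else checkB_rules first last rest

def check_update_alt (rules : List (Int × List Int)) (update : List Int) : Bool :=
  let fl := checkB_flLoop update 0 PySem.Dict.empty PySem.Dict.empty
  checkB_rules fl.1 fl.2 (PySem.Dict.ofList rules).items

-- ===== PRECONDITION & SPEC =====
def Spec_check_update (rules : List (Int × List Int)) (update : List Int) (out : Bool) : Prop := out = check_update_alt rules update
instance (rules : List (Int × List Int)) (update : List Int) (out : Bool) : Decidable (Spec_check_update rules update out) := by unfold Spec_check_update; infer_instance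

-- ===== CLAIM (what is proved, stated in full; the proofs are below) =====
def Claim_equal_check_update : Prop := ∀ (rules : List (Int × List Int)) (update : List Int), Dom_check_update rules update → Spec_check_update rules update (check_update rules update)

-- ===== LEMMAS AND PROOFS =====

-- proof-side pairwise view of the check: for each suffix u :: rest, no successor of u occurs in rest
def pairLoop (rules : PySem.Dict Int (List Int)) : List Int → Bool
  | [] => true
  | u :: rest =>
    if (PySem.Dict.getD rules u []).any (fun v => rest.contains v) then false
    else pairLoop rules rest

-- the violation predicates characterizing A (via pairLoop) and B
def ViolA (rules : PySem.Dict Int (List Int)) (us : List Int) : Prop :=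
  ∃ pre u suf, us = pre ++ u :: suf ∧ ∃ v ∈ PySem.Dict.getD rules u [], v ∈ suf

def ViolB (rules : PySem.Dict Int (List Int)) (us : List Int) : Prop :=
  ∃ k vs, (k, vs) ∈ rules.items ∧ ∃ i, PySem.List.index? us k = some i ∧
    ∃ v ∈ vs, v ∈ us.drop (i + 1)

theorem checkA_loop_eq (rules : PySem.Dict Int (List Int)) (us : List Int) :
    ∀ s : PySem.Set Int,
      checkA_loop rules us s = ((us.all fun x => !(PySem.Set.contains s x)) && pairLoop rules us) := by
  induction us with
  | nil => intro s; simp [checkA_loop, pairLoop]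
  | cons u rest ih =>
    intro s
    by_cases hm : u ∈ s
    · simp [checkA_loop, pairLoop, PySem.Set.contains, hm]
    · have hu : (!PySem.Set.contains s u) = true := by simp [PySem.Set.contains, hm]
      by_cases hc : PySem.Dict.contains rules u = true
      · have e1 : checkA_loop rules (u :: rest) s
            = checkA_loop rules rest (PySem.Set.update s (PySem.Dict.getD rules u [])) := by
          simp only [checkA_loop]
          rw [if_neg (by simp [PySem.Set.contains, hm]), if_pos hc]
        by_cases hv : ∃ v ∈ PySem.Dict.getD rules u [], v ∈ rest
        · obtain ⟨v, hvR, hvrest⟩ := hv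
          have hall : (rest.all fun x => !(PySem.Set.contains (PySem.Set.update s (PySem.Dict.getD rules u [])) x)) = false :=
            List.all_eq_false.mpr ⟨v, hvrest,
              by simp [PySem.Set.contains, (PySem.Set.mem_update _ _ _).mpr (Or.inr hvR)]⟩
          have hany : ((PySem.Dict.getD rules u []).any fun v => rest.contains v) = true :=
            List.any_eq_true.mpr ⟨v, hvR, by simpa using hvrest⟩
          have e2 : pairLoop rules (u :: rest) = false := by
            simp only [pairLoop]
            rw [hany]
            simp
          rw [e1, ih, hall, Bool.false_and, e2, Bool.and_false]
        · have hany : ((PySem.Dict.getD rules u []).any fun v => rest.contains v) = false := by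
            simp only [List.any_eq_false]
            intro v hvR
            simp only [List.contains_eq_mem]
            exact fun h => hv ⟨v, hvR, of_decide_eq_true h⟩
          have hall : (rest.all fun x => !(PySem.Set.contains (PySem.Set.update s (PySem.Dict.getD rules u [])) x)) = (rest.all fun x => !(PySem.Set.contains s x)) := by
            rw [Bool.eq_iff_iff]
            simp only [List.all_eq_true, Bool.not_eq_true', PySem.Set.contains,
              List.contains_eq_mem, decide_eq_false_iff_not]
            constructor
            · intro h x hx hxs
              exact h x hx ((PySem.Set.mem_update _ _ _).mpr (Or.inl hxs))
            · intro h x hx hxu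
              rcases (PySem.Set.mem_update _ _ _).mp hxu with h1 | h2
              · exact h x hx h1
              · exact hv ⟨x, h2, hx⟩
          have e2 : pairLoop rules (u :: rest) = pairLoop rules rest := by
            simp only [pairLoop]
            rw [hany]
            simp
          rw [e1, ih, hall, e2, List.all_cons, hu, Bool.true_and]
      · have hg : PySem.Dict.get? rules u = none := by
          rw [PySem.Dict.contains_eq_isSome_get?] at hc
          exact Option.not_isSome_iff_eq_none.mp (by simpa using hc)
        have hget : PySem.Dict.getD rules u [] = [] := by
          simp [PySem.Dict.getD, hg]
        have e1 : checkA_loop rules (u :: rest) s = checkA_loop rules rest s := by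
          simp only [checkA_loop]
          rw [if_neg (by simp [PySem.Set.contains, hm]), if_neg (by simp [hc])]
        have e2 : pairLoop rules (u :: rest) = pairLoop rules rest := by
          simp only [pairLoop]
          rw [hget]
          simp
        rw [e1, ih, e2, List.all_cons, hu, Bool.true_and]

theorem violA_cons (rules : PySem.Dict Int (List Int)) (u : Int) (rest : List Int) :
    ViolA rules (u :: rest) ↔ (∃ v ∈ PySem.Dict.getD rules u [], v ∈ rest) ∨ ViolA rules rest := by
  constructor
  · rintro ⟨pre, u', suf, heq, v, hv, hvsuf⟩
    cases pre with
    | nil =>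
      simp only [List.nil_append, List.cons.injEq] at heq
      exact Or.inl ⟨v, heq.1 ▸ hv, heq.2 ▸ hvsuf⟩
    | cons p pre =>
      simp only [List.cons_append, List.cons.injEq] at heq
      exact Or.inr ⟨pre, u', suf, heq.2, v, hv, hvsuf⟩
  · rintro (⟨v, hv, hvrest⟩ | ⟨pre, u', suf, heq, v, hv, hvsuf⟩)
    · exact ⟨[], u, rest, rfl, v, hv, hvrest⟩
    · exact ⟨u :: pre, u', suf, by rw [heq, List.cons_append], v, hv, hvsuf⟩

theorem pairLoop_eq_violA (rules : PySem.Dict Int (List Int)) (us : List Int) :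
    pairLoop rules us = true ↔ ¬ ViolA rules us := by
  induction us with
  | nil =>
    refine ⟨fun _ h => ?_, fun _ => rfl⟩
    obtain ⟨pre, u', suf, heq, -⟩ := h
    exact absurd heq (by simp)
  | cons u rest ih =>
    rw [violA_cons]
    simp only [pairLoop]
    by_cases h : ((PySem.Dict.getD rules u []).any fun v => rest.contains v) = true
    · rw [if_pos h]
      obtain ⟨v, hv, hvr⟩ := List.any_eq_true.mp h
      simp only [Bool.false_eq_true, false_iff, not_not]
      exact Or.inl ⟨v, hv, by simpa using hvr⟩
    · rw [if_neg h, ih, not_or]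
      have hno : ¬ ∃ v ∈ PySem.Dict.getD rules u [], v ∈ rest := by
        rintro ⟨v, hv, hvr⟩
        exact h (List.any_eq_true.mpr ⟨v, hv, by simpa using hvr⟩)
      exact (and_iff_right hno).symm

-- proof-side helper: index of the LAST occurrence of x
def lastIdx? : List Int → Int → Option Nat
  | [], _ => none
  | u :: rest, x =>
    match lastIdx? rest x with
    | some k => some (k + 1)
    | none => if u = x then some 0 else none

theorem lastIdx?_eq_none_iff (us : List Int) (x : Int) :
    lastIdx? us x = none ↔ x ∉ us := by
  induction us with
  | nil => simp [lastIdx?]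
  | cons u rest ih =>
    simp only [lastIdx?]
    cases h : lastIdx? rest x with
    | some k =>
      have hx : x ∈ rest := by
        by_contra hx
        rw [ih.mpr hx] at h
        simp at h
      simp [hx]
    | none =>
      by_cases hu : u = x
      · simp [hu]
      · rw [if_neg hu]
        simp only [List.mem_cons, not_or]
        exact iff_of_true trivial ⟨fun e => hu e.symm, ih.mp h⟩

theorem mem_drop_iff_lastIdx (us : List Int) (v : Int) (m : Nat) :
    v ∈ us.drop m ↔ ∃ j, lastIdx? us v = some j ∧ m ≤ j := by
  induction us generalizing m with
  | nil => simp [lastIdx?]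
  | cons u rest ih =>
    cases m with
    | zero =>
      rw [List.drop_zero]
      constructor
      · intro hv
        cases h : lastIdx? (u :: rest) v with
        | none => exact absurd hv ((lastIdx?_eq_none_iff _ _).mp h)
        | some j => exact ⟨j, rfl, Nat.zero_le _⟩
      · rintro ⟨j, hj, -⟩
        by_contra hv
        rw [(lastIdx?_eq_none_iff _ _).mpr hv] at hj
        simp at hj
    | succ m =>
      rw [List.drop_succ_cons, ih]
      constructor
      · rintro ⟨k, hk, hm⟩
        refine ⟨k + 1, ?_, by omega⟩
        simp [lastIdx?, hk]
      · rintro ⟨j, hj, hm⟩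
        simp only [lastIdx?] at hj
        cases hrec : lastIdx? rest v with
        | some k =>
          rw [hrec] at hj
          simp only [Option.some.injEq] at hj
          exact ⟨k, rfl, by omega⟩
        | none =>
          rw [hrec] at hj
          by_cases hu : u = v
          · simp only [if_pos hu, Option.some.injEq] at hj
            omega
          · simp [hu] at hj

theorem flLoop_fst_get? (us : List Int) :
    ∀ (i : Int) (f l : PySem.Dict Int Int) (x : Int),
      (checkB_flLoop us i f l).1.get? x =
        if f.contains x = true then f.get? x
        else (PySem.List.index? us x).map (fun k => i + (k : Int)) := by
  induction us with
  | nil =>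
    intro i f l x
    by_cases hc : f.contains x = true
    · simp [checkB_flLoop, hc]
    · have hn : f.get? x = none := by
        rw [PySem.Dict.get?_eq_none_iff_contains]
        simpa using hc
      simp [checkB_flLoop, hc, hn, PySem.List.index?]
  | cons u rest ih =>
    intro i f l x
    simp only [checkB_flLoop]
    rw [ih]
    by_cases hux : u = x
    · subst hux
      by_cases hc : f.contains u = true
      · rw [if_pos hc, if_pos hc, if_pos hc]
      · rw [if_neg hc, if_neg hc,
          if_pos (PySem.Dict.contains_insert_self f u i),
          PySem.Dict.get?_insert_self, PySem.List.index?_cons_self]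
        simp
    · have hxu : x ≠ u := fun e => hux e.symm
      have hcx : (if f.contains u = true then f else f.insert u i).contains x = f.contains x := by
        by_cases hc : f.contains u = true
        · rw [if_pos hc]
        · rw [if_neg hc, PySem.Dict.contains_insert]
          simp [hxu]
      have hgx : (if f.contains u = true then f else f.insert u i).get? x = f.get? x := by
        by_cases hc : f.contains u = true
        · rw [if_pos hc]
        · rw [if_neg hc, PySem.Dict.get?_insert_of_ne f i hxu]
      rw [hcx, hgx, PySem.List.index?_cons_of_ne rest hux]
      by_cases hc : f.contains x = true
      · rw [if_pos hc, if_pos hc]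
      · rw [if_neg hc, if_neg hc]
        cases PySem.List.index? rest x with
        | none => rfl
        | some k =>
          simp
          omega

theorem flLoop_snd_get? (us : List Int) :
    ∀ (i : Int) (f l : PySem.Dict Int Int) (x : Int),
      (checkB_flLoop us i f l).2.get? x =
        match lastIdx? us x with
        | some k => some (i + (k : Int))
        | none => l.get? x := by
  induction us with
  | nil =>
    intro i f l x
    simp [checkB_flLoop, lastIdx?]
  | cons u rest ih =>
    intro i f l x
    simp only [checkB_flLoop, lastIdx?]
    rw [ih]
    cases h : lastIdx? rest x with
    | some k =>
      simp only [Option.some.injEq]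
      push_cast
      ring
    | none =>
      by_cases hux : u = x
      · subst hux
        rw [if_pos rfl, PySem.Dict.get?_insert_self]
        simp
      · rw [if_neg hux, PySem.Dict.get?_insert_of_ne l i (fun e : x = u => hux e.symm)]

theorem checkB_rules_eq' (us : List Int) (F L2 : PySem.Dict Int Int)
    (hF : ∀ x, F.get? x = (PySem.List.index? us x).map (fun k => (k : Int)))
    (hL : ∀ x, L2.get? x = (lastIdx? us x).map (fun k => (k : Int)))
    (L : List (Int × List Int)) :
    checkB_rules F L2 L = true ↔
      ∀ k vs, (k, vs) ∈ L → ∀ i, PySem.List.index? us k = some i → ∀ v ∈ vs, v ∉ us.drop (i + 1) := by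
  induction L with
  | nil => simp [checkB_rules]
  | cons p rest ih =>
    obtain ⟨key, succs⟩ := p
    by_cases hc : F.contains key = true
    · obtain ⟨i, hi⟩ : ∃ i, PySem.List.index? us key = some i := by
        rw [PySem.Dict.contains_eq_isSome_get?, hF] at hc
        cases h : PySem.List.index? us key with
        | none => rw [h] at hc; simp at hc
        | some i => exact ⟨i, rfl⟩
      have hgd : F.getD key 0 = (i : Int) := by
        rw [PySem.Dict.getD_eq_get?_getD, hF, hi]; rfl
      have hcond : ∀ v : Int,
          (L2.contains v && decide (F.getD key 0 < L2.getD v 0)) = true ↔ v ∈ us.drop (i + 1) := by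
        intro v
        rw [mem_drop_iff_lastIdx]
        cases hl : lastIdx? us v with
        | some j =>
          have hcv : L2.contains v = true := by
            rw [PySem.Dict.contains_eq_isSome_get?, hL, hl]; rfl
          have hgv : L2.getD v 0 = (j : Int) := by
            rw [PySem.Dict.getD_eq_get?_getD, hL, hl]; rfl
          rw [hcv, hgd, hgv]
          simp only [Bool.true_and, decide_eq_true_eq]
          constructor
          · intro h1
            exact ⟨j, rfl, by omega⟩
          · rintro ⟨j', hj', hle⟩
            injection hj' with e
            subst e
            omega
        | none =>
          have hcv : L2.contains v = false := by
            rw [PySem.Dict.contains_eq_isSome_get?, hL, hl]; rfl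
          rw [hcv]
          simp
      by_cases ha : (succs.any fun v => L2.contains v && decide (F.getD key 0 < L2.getD v 0)) = true
      · have e : checkB_rules F L2 ((key, succs) :: rest) = false := by
          simp [checkB_rules, hc, ha]
        rw [e]
        obtain ⟨v, hv, hvc⟩ := List.any_eq_true.mp ha
        simp only [Bool.false_eq_true, false_iff, not_forall]
        exact ⟨key, succs, List.mem_cons_self, i, hi, v, hv, fun hno => hno ((hcond v).mp hvc)⟩
      · have e : checkB_rules F L2 ((key, succs) :: rest) = checkB_rules F L2 rest := by
          simp [checkB_rules, hc, ha]
        rw [e, ih]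
        constructor
        · intro h k vs hkv j hj v hv hvd
          rcases List.mem_cons.mp hkv with heq | hmem
          · injection heq with h1 h2
            subst h1; subst h2
            rw [hi] at hj
            injection hj with hij
            subst hij
            exact ha (List.any_eq_true.mpr ⟨v, hv, (hcond v).mpr hvd⟩)
          · exact h k vs hmem j hj v hv hvd
        · intro h k vs hmem j hj v hv hvd
          exact h k vs (List.mem_cons_of_mem _ hmem) j hj v hv hvd
    · have hnone : PySem.List.index? us key = none := by
        rw [PySem.Dict.contains_eq_isSome_get?, hF] at hc
        cases h : PySem.List.index? us key with
        | none => rfl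
        | some i => rw [h] at hc; simp at hc
      have e : checkB_rules F L2 ((key, succs) :: rest) = checkB_rules F L2 rest := by
        simp [checkB_rules, hc]
      rw [e, ih]
      constructor
      · intro h k vs hkv j hj v hv hvd
        rcases List.mem_cons.mp hkv with heq | hmem
        · injection heq with h1 h2
          subst h1
          rw [hnone] at hj
          simp at hj
        · exact h k vs hmem j hj v hv hvd
      · intro h k vs hmem j hj v hv hvd
        exact h k vs (List.mem_cons_of_mem _ hmem) j hj v hv hvd

theorem checkB_rules_eq (us : List Int) (L : List (Int × List Int)) :
    checkB_rules (checkB_flLoop us 0 PySem.Dict.empty PySem.Dict.empty).1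
        (checkB_flLoop us 0 PySem.Dict.empty PySem.Dict.empty).2 L = true ↔
      ∀ k vs, (k, vs) ∈ L → ∀ i, PySem.List.index? us k = some i → ∀ v ∈ vs, v ∉ us.drop (i + 1) := by
  apply checkB_rules_eq' us
  · intro x
    rw [flLoop_fst_get?]
    rw [PySem.Dict.contains_empty]
    simp [PySem.Dict.get?_empty]
  · intro x
    rw [flLoop_snd_get?]
    cases h : lastIdx? us x with
    | some k => simp
    | none => simp [PySem.Dict.get?_empty]

theorem checkB_eq_violB (rules : PySem.Dict Int (List Int)) (us : List Int) :
    checkB_rules (checkB_flLoop us 0 PySem.Dict.empty PySem.Dict.empty).1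
      (checkB_flLoop us 0 PySem.Dict.empty PySem.Dict.empty).2 rules.items = true ↔ ¬ ViolB rules us := by
  rw [checkB_rules_eq]
  unfold ViolB
  push Not
  constructor
  · intro h k vs hkv i hi v hv
    exact h k vs hkv i hi v hv
  · intro h k vs hkv i hi v hv
    exact h k vs hkv i hi v hv

theorem violA_iff_violB (rules : PySem.Dict Int (List Int)) (hnd : rules.keys.Nodup) (us : List Int) :
    ViolA rules us ↔ ViolB rules us := by
  constructor
  · rintro ⟨pre, u, suf, heq, v, hv, hvsuf⟩
    subst heq
    obtain ⟨vs, hg⟩ : ∃ vs, PySem.Dict.get? rules u = some vs := by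
      cases hgg : PySem.Dict.get? rules u with
      | none =>
        rw [PySem.Dict.getD_eq_get?_getD, hgg] at hv
        cases hv
      | some vs => exact ⟨vs, rfl⟩
    have hvvs : v ∈ vs := by
      rwa [PySem.Dict.getD_eq_get?_getD, hg] at hv
    have hmem : (u, vs) ∈ rules.items := PySem.Dict.mem_items_of_get?_eq_some rules hg
    have humem : u ∈ pre ++ u :: suf := List.mem_append_right _ (List.mem_cons_self)
    obtain ⟨i, hi⟩ := Option.isSome_iff_exists.mp
      ((PySem.List.index?_isSome_iff (pre ++ u :: suf) u).mpr humem)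
    obtain ⟨hlt, hui, hmin⟩ := PySem.List.getElem_of_index?_eq_some hi
    have hple : pre.length < (pre ++ u :: suf).length := by simp
    have hip : i ≤ pre.length := by
      by_contra hgt
      push Not at hgt
      refine hmin pre.length hgt ?_
      rw [List.getElem_append_right (le_refl pre.length)]
      simp
    have hdrop : (pre ++ u :: suf).drop (pre.length + 1) = suf := by
      rw [show pre.length + 1 = (pre ++ [u]).length by simp,
        show pre ++ u :: suf = (pre ++ [u]) ++ suf by simp, List.drop_left]
    refine ⟨u, vs, hmem, i, hi, v, hvvs, ?_⟩
    have hdd : (pre ++ u :: suf).drop (pre.length + 1)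
        = ((pre ++ u :: suf).drop (i + 1)).drop (pre.length - i) := by
      rw [List.drop_drop]
      congr 1
      omega
    exact List.mem_of_mem_drop (by rw [← hdd, hdrop]; exact hvsuf)
  · rintro ⟨k, vs, hmem, i, hi, v, hv, hvd⟩
    obtain ⟨pre, suf, heq, hlen, _⟩ := (PySem.List.index?_eq_some_iff us k i).mp hi
    have hdrop : us.drop (i + 1) = suf := by
      rw [heq, ← hlen, show pre.length + 1 = (pre ++ [k]).length by simp,
        show pre ++ k :: suf = (pre ++ [k]) ++ suf by simp, List.drop_left]
    have hgd : PySem.Dict.getD rules k [] = vs := PySem.Dict.getD_of_mem_items rules hmem hnd []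
    exact ⟨pre, k, suf, heq, v, hgd ▸ hv, hdrop ▸ hvd⟩

-- ===== VERDICT (by name: the statement is the Claim_ definition above) =====
theorem check_update_spec : Claim_equal_check_update := by
  intro rules update _
  unfold Spec_check_update check_update check_update_alt
  rw [checkA_loop_eq]
  have h : (update.all fun x => !(PySem.Set.contains PySem.Set.empty x)) = true := by
    apply List.all_eq_true.mpr
    intro x _
    simp [PySem.Set.contains, PySem.Set.empty]
  rw [h, Bool.true_and, Bool.eq_iff_iff, pairLoop_eq_violA, checkB_eq_violB,
    violA_iff_violB _ (PySem.Dict.nodup_keys_ofList rules)]
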